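-- pv_equiv track=rewrite | github.com/richscottwill/agent-bridge | dashboards/refresh-state-files.py | parse_all_tables
-- ===== SOURCE A (Python) =====
-- def parse_markdown_table(text):
--     lines = [ln for ln in text.splitlines() if ln.strip().startswith("|")]
--     if len(lines) < 2:
--         return []
--     header = [c.strip() for c in lines[0].strip().strip("|").split("|")]
--     rows = []
--     for ln in lines[2:]:
--         cells = [c.strip() for c in ln.strip().strip("|").split("|")]
--         if len(cells) != len(header):
--             continue
--         rows.append(dict(zip(header, cells)))
--     return rows
--
-- def parse_all_tables(text):
--     tables = []
--     buf = []
--     for ln in text.splitlines():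
--         if ln.strip().startswith("|"):
--             buf.append(ln)
--         else:
--             if buf:
--                 t = parse_markdown_table("\n".join(buf))
--                 if t:
--                     tables.append(t)
--                 buf = []
--     if buf:
--         t = parse_markdown_table("\n".join(buf))
--         if t:
--             tables.append(t)
--     return tables
-- ===== SOURCE B (Python) =====
-- def parse_all_tables(text):
--     # one streaming pass: no intermediate block buffers, no re-splitting
--     tables = []
--     header = []
--     pos = 0
--     rows = []
--     for ln in text.splitlines():
--         if ln.strip().startswith("|"):
--             if pos == 0:
--                 header = [c.strip() for c in ln.strip().strip("|").split("|")]
--             elif pos >= 2: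
--                 cells = [c.strip() for c in ln.strip().strip("|").split("|")]
--                 if len(cells) == len(header):
--                     rows.append(dict(zip(header, cells)))
--             pos += 1
--         else:
--             if rows:
--                 tables.append(rows)
--             header = []
--             pos = 0
--             rows = []
--     if rows:
--         tables.append(rows)
--     return tables
-- ===== Notes on version B (the rewrite author's own statement) =====
-- stated objective: simpler
-- what changed: Replaced the buffer-then-reparse two-phase design (collect block lines, join with newlines, re-splitlines and re-filter inside a helper) with a single streaming state machine over the lines that maintains the current header, a position counter and the accumulating rows, so each line is handled exactly once and no intermediate block strings are built.
import Mathlib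
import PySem

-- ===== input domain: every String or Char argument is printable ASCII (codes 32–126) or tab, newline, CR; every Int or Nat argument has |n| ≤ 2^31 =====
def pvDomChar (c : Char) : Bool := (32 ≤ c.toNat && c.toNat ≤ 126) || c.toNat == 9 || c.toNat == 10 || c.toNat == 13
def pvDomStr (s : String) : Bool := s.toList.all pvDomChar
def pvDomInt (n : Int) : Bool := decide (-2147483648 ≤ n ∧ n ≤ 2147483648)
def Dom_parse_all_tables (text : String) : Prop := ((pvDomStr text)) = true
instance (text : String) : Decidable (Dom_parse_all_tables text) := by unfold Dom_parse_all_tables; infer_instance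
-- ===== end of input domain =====

-- B replaces A's buffer-then-reparse design (collect block lines, join with newlines, re-split
-- and re-filter inside a helper) with a single streaming state machine over the lines.

-- ===== PORT A =====
-- [c.strip() for c in ln.strip().strip("|").split("|")]  (this expression appears verbatim in both Pythons)
def pvSplitRow (ln : String) : List String :=
  (((PySem.Str.split? (PySem.Str.stripChars (PySem.Str.strip ln) "|") "|").getD []).map PySem.Str.strip)

-- dict(zip(header, cells)) as an insertion-order association list (appears in both Pythons)
def pvRowDict (header cells : List String) : List (String × String) :=
  ((header.zip cells).foldl (fun d kv => d.insert kv.1 kv.2) PySem.Dict.empty).items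

def parse_markdown_table (text : String) : List (List (String × String)) :=
  let lines := (PySem.Str.splitlines text).filter
      (fun ln => PySem.Str.startswith (PySem.Str.strip ln) "|")
  match lines with
  | l0 :: _ :: rest =>              -- len(lines) < 2 → [];  header = lines[0], rows over lines[2:]
    let header := pvSplitRow l0
    rest.foldl (fun rows ln =>
      let cells := pvSplitRow ln
      if cells.length ≠ header.length then rows
      else rows ++ [pvRowDict header cells]) []
  | _ => []

-- the body of A's for-loop: state (tables, buf)
def pvStepA (st : List (List (List (String × String))) × List String) (ln : String) :
    List (List (List (String × String))) × List String :=
  if PySem.Str.startswith (PySem.Str.strip ln) "|" then (st.1, st.2 ++ [ln])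
  else if st.2 ≠ [] then
    (let t := parse_markdown_table (PySem.Str.join "\n" st.2)
     if t ≠ [] then st.1 ++ [t] else st.1, [])
  else (st.1, [])

def parse_all_tables (text : String) : List (List (List (String × String))) :=
  let st := (PySem.Str.splitlines text).foldl pvStepA ([], [])
  if st.2 ≠ [] then
    (let t := parse_markdown_table (PySem.Str.join "\n" st.2)
     if t ≠ [] then st.1 ++ [t] else st.1)
  else st.1

-- ===== PORT B =====
-- the body of B's for-loop: state (tables so far, current header, position in block, current rows)
def pvStep (st : List (List (List (String × String))) × List String × Nat × List (List (String × String)))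
    (ln : String) : List (List (List (String × String))) × List String × Nat × List (List (String × String)) :=
  let (tables, header, pos, rows) := st
  if PySem.Str.startswith (PySem.Str.strip ln) "|" then
    if pos = 0 then (tables, pvSplitRow ln, pos + 1, rows)
    else if pos ≥ 2 then
      let cells := pvSplitRow ln
      if cells.length = header.length then (tables, header, pos + 1, rows ++ [pvRowDict header cells])
      else (tables, header, pos + 1, rows)
    else (tables, header, pos + 1, rows)
  else
    if rows ≠ [] then (tables ++ [rows], [], 0, []) else (tables, [], 0, [])

def parse_all_tables_alt (text : String) : List (List (List (String × String))) :=
  let st := (PySem.Str.splitlines text).foldl pvStep ([], [], 0, [])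
  if st.2.2.2 ≠ [] then st.1 ++ [st.2.2.2] else st.1

-- ===== PRECONDITION & SPEC =====
def Spec_parse_all_tables (text : String) (out : List (List (List (String × String)))) : Prop := out = parse_all_tables_alt text
instance (text : String) (out : List (List (List (String × String)))) : Decidable (Spec_parse_all_tables text out) := by unfold Spec_parse_all_tables; infer_instance

-- ===== CLAIM (what is proved, stated in full; the proofs are below) =====
def Claim_equal_parse_all_tables : Prop := ∀ (text : String), Dom_parse_all_tables text → Spec_parse_all_tables text (parse_all_tables text)

-- ===== LEMMAS AND PROOFS =====

-- the line-break predicate used inside PySem.Chars.splitlines (definitionally equal to it)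
def pvIsB (c : Char) : Bool :=
  decide (c.toNat = 10) || decide (c.toNat = 13) || decide (c.toNat = 11) || decide (c.toNat = 12) ||
  decide (c.toNat = 28) || decide (c.toNat = 29) || decide (c.toNat = 30) || decide (c.toNat = 133) ||
  decide (c.toNat = 8232) || decide (c.toNat = 8233)

theorem go_bf (s cur : List Char) (acc : List (List Char))
    (hc : ∀ c ∈ cur, pvIsB c = false)
    (ha : ∀ l ∈ acc, ∀ c ∈ l, pvIsB c = false) :
    ∀ l ∈ PySem.Chars.splitlines.go pvIsB s cur acc, ∀ c ∈ l, pvIsB c = false := by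
  fun_induction PySem.Chars.splitlines.go pvIsB s cur acc
  case case1 => intro l hl; exact ha l (List.mem_reverse.mp hl)
  case case2 =>
    intro l hl
    rcases List.mem_cons.mp (List.mem_reverse.mp hl) with rfl | h
    · intro c hc'; exact hc c (List.mem_reverse.mp hc')
    · exact ha l h
  case case3 ih =>
    exact ih (by simp) (by
      intro l hl
      rcases List.mem_cons.mp hl with rfl | h
      · intro c hc'; exact hc c (List.mem_reverse.mp hc')
      · exact ha l h)
  case case4 ih =>
    exact ih (by simp) (by
      intro l hl
      rcases List.mem_cons.mp hl with rfl | h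
      · intro c hc'; exact hc c (List.mem_reverse.mp hc')
      · exact ha l h)
  case case5 c rest cur acc hpat hb ih =>
    refine ih ?_ ha
    intro c' h
    rcases List.mem_cons.mp h with rfl | h
    · simpa using hb
    · exact hc c' h

theorem go_cons_nb (c : Char) (s cur : List Char) (acc : List (List Char)) (h : pvIsB c = false) :
    PySem.Chars.splitlines.go pvIsB (c :: s) cur acc = PySem.Chars.splitlines.go pvIsB s (c :: cur) acc := by
  rw [PySem.Chars.splitlines.go.eq_def]
  split
  case _ heq => exact absurd heq (by simp)
  case _ heq =>
    obtain ⟨h1, -⟩ := List.cons_eq_cons.mp heq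
    subst h1
    exact absurd h (by decide)
  case _ c' rest hpat heq =>
    obtain ⟨h1, h2⟩ := List.cons_eq_cons.mp heq
    subst h1; subst h2
    rw [if_neg (by simp [h])]

theorem go_nl (s cur : List Char) (acc : List (List Char)) :
    PySem.Chars.splitlines.go pvIsB ('\n' :: s) cur acc
      = PySem.Chars.splitlines.go pvIsB s [] (cur.reverse :: acc) := by
  rw [PySem.Chars.splitlines.go.eq_def]
  split
  case _ heq => exact absurd heq (by simp)
  case _ heq =>
    obtain ⟨h1, -⟩ := List.cons_eq_cons.mp heq
    exact absurd h1 (by decide)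
  case _ c' rest hpat heq =>
    obtain ⟨h1, h2⟩ := List.cons_eq_cons.mp heq
    subst h1; subst h2
    rw [if_pos (by decide)]

theorem go_append_nb (l : List Char) (hbf : ∀ c ∈ l, pvIsB c = false) :
    ∀ (rest cur : List Char) (acc : List (List Char)),
    PySem.Chars.splitlines.go pvIsB (l ++ rest) cur acc
      = PySem.Chars.splitlines.go pvIsB rest (l.reverse ++ cur) acc := by
  induction l with
  | nil => intro rest cur acc; simp
  | cons c l ih =>
    intro rest cur acc
    rw [List.cons_append, go_cons_nb c _ _ _ (hbf c (List.mem_cons_self))]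
    rw [ih (fun c' h => hbf c' (List.mem_cons_of_mem _ h))]
    simp

theorem go_join (bufs : List (List Char)) (hne : bufs ≠ [])
    (h : ∀ l ∈ bufs, l ≠ [] ∧ ∀ c ∈ l, pvIsB c = false) :
    ∀ acc, PySem.Chars.splitlines.go pvIsB (List.intercalate ['\n'] bufs) [] acc
      = acc.reverse ++ bufs := by
  induction bufs with
  | nil => exact absurd rfl hne
  | cons l bufs ih =>
    intro acc
    obtain ⟨hl, hbf⟩ := h l List.mem_cons_self
    cases bufs with
    | nil =>
      rw [show List.intercalate ['\n'] [l] = l by simp [List.intercalate, List.intersperse],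
        show (l : List Char) = l ++ [] by simp,
        go_append_nb l hbf, PySem.Chars.splitlines.go.eq_def]
      simp [List.isEmpty_iff, hl]
    | cons l2 bufs2 =>
      have : List.intercalate ['\n'] (l :: l2 :: bufs2) = l ++ '\n' :: List.intercalate ['\n'] (l2 :: bufs2) := by
        simp [List.intercalate, List.intersperse]
      rw [this, go_append_nb l hbf, show (l.reverse ++ [] : List Char) = l.reverse by simp, go_nl,
        ih (by simp) (fun x hx => h x (List.mem_cons_of_mem _ hx))]
      simp

theorem splitlines_join (bufs : List (List Char)) (hne : bufs ≠ [])
    (h : ∀ l ∈ bufs, l ≠ [] ∧ ∀ c ∈ l, pvIsB c = false) :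
    PySem.Chars.splitlines (PySem.Chars.join ['\n'] bufs) = bufs := by
  show PySem.Chars.splitlines.go pvIsB (List.intercalate ['\n'] bufs) [] [] = bufs
  rw [go_join bufs hne h []]; simp

theorem splitlines_bf (s : List Char) :
    ∀ l ∈ PySem.Chars.splitlines s, ∀ c ∈ l, pvIsB c = false := by
  exact go_bf s [] [] (by simp) (by simp)

theorem str_splitlines_bf (s : String) :
    ∀ l ∈ PySem.Str.splitlines s, ∀ c ∈ l.toList, pvIsB c = false := by
  intro l hl
  exact splitlines_bf s.toList l.toList
    (by rw [← PySem.Str.splitlines_map_toList]; exact List.mem_map_of_mem hl)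

theorem start_ne (l : String) (h : PySem.Str.startswith (PySem.Str.strip l) "|" = true) :
    l.toList ≠ [] := by
  intro hnil
  rw [PySem.Str.startswith_eq, PySem.Str.toList_strip, hnil] at h
  exact absurd h (by decide)

theorem str_splitlines_join (buf : List String) (hne : buf ≠ [])
    (h : ∀ l ∈ buf, l.toList ≠ [] ∧ ∀ c ∈ l.toList, pvIsB c = false) :
    PySem.Str.splitlines (PySem.Str.join "\n" buf) = buf := by
  have hm : List.map String.toList (PySem.Str.splitlines (PySem.Str.join "\n" buf))
      = List.map String.toList buf := by
    rw [PySem.Str.splitlines_map_toList, PySem.Str.toList_join]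
    exact splitlines_join (buf.map String.toList) (by simpa using hne)
      (by intro l hl; obtain ⟨x, hx, rfl⟩ := List.mem_map.mp hl; exact h x hx)
  exact List.map_injective_iff.mpr (fun a b hab => String.toList_inj.mp hab) hm

-- "ln is a line of the current buffer": kept by the filter, and free of line-break characters
def pvGood (ln : String) : Prop :=
  PySem.Str.startswith (PySem.Str.strip ln) "|" = true ∧ ∀ c ∈ ln.toList, pvIsB c = false

def pvHdr (buf : List String) : List String :=
  match buf with | [] => [] | l :: _ => pvSplitRow l

def pvBlockRows (buf : List String) : List (List (String × String)) :=
  match buf with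
  | l0 :: _ :: rest =>
    rest.foldl (fun rows ln =>
      let cells := pvSplitRow ln
      if cells.length ≠ (pvSplitRow l0).length then rows
      else rows ++ [pvRowDict (pvSplitRow l0) cells]) []
  | _ => []

theorem pmt_block (buf : List String) (hne : buf ≠ []) (hg : ∀ l ∈ buf, pvGood l) :
    parse_markdown_table (PySem.Str.join "\n" buf) = pvBlockRows buf := by
  unfold parse_markdown_table
  rw [str_splitlines_join buf hne (fun l hl => ⟨start_ne l (hg l hl).1, (hg l hl).2⟩),
    List.filter_eq_self.mpr (fun l hl => (hg l hl).1)]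
  match buf with
  | [] => rfl
  | [l] => rfl
  | l0 :: l1 :: rest => rfl

def pvFinA (st : List (List (List (String × String))) × List String) :
    List (List (List (String × String))) :=
  if st.2 ≠ [] then
    (let t := parse_markdown_table (PySem.Str.join "\n" st.2)
     if t ≠ [] then st.1 ++ [t] else st.1)
  else st.1

def pvFinB (st : List (List (List (String × String))) × List String × Nat × List (List (String × String))) :
    List (List (List (String × String))) :=
  if st.2.2.2 ≠ [] then st.1 ++ [st.2.2.2] else st.1

theorem fin_eq (ta : List (List (List (String × String)))) (buf : List String)
    (hg : ∀ l ∈ buf, pvGood l) :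
    pvFinA (ta, buf) = pvFinB (ta, pvHdr buf, buf.length, pvBlockRows buf) := by
  cases buf with
  | nil => rfl
  | cons l0 bufr =>
    simp only [pvFinA, pvFinB]
    rw [pmt_block _ (by simp) hg]
    simp

theorem main_loop (L : List String) (hL : ∀ l ∈ L, ∀ c ∈ l.toList, pvIsB c = false) :
    ∀ (ta : List (List (List (String × String)))) (buf : List String), (∀ l ∈ buf, pvGood l) →
    pvFinA (L.foldl pvStepA (ta, buf))
      = pvFinB (L.foldl pvStep (ta, pvHdr buf, buf.length, pvBlockRows buf)) := by
  induction L with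
  | nil => intro ta buf hg; exact fin_eq ta buf hg
  | cons ln L ih =>
    intro ta buf hg
    simp only [List.foldl_cons]
    by_cases hs : PySem.Str.startswith (PySem.Str.strip ln) "|" = true
    · have hgood : ∀ l ∈ buf ++ [ln], pvGood l := by
        intro l hl
        rcases List.mem_append.mp hl with h | h
        · exact hg l h
        · simp only [List.mem_singleton] at h; subst h
          exact ⟨hs, hL l List.mem_cons_self⟩
      have hA : pvStepA (ta, buf) ln = (ta, buf ++ [ln]) := by
        simp only [pvStepA]; rw [if_pos hs]
      have hB : pvStep (ta, pvHdr buf, buf.length, pvBlockRows buf) ln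
          = (ta, pvHdr (buf ++ [ln]), (buf ++ [ln]).length, pvBlockRows (buf ++ [ln])) := by
        cases buf with
        | nil => simp only [pvStep]; rw [if_pos hs]; simp [pvHdr, pvBlockRows]
        | cons a buf' =>
          cases buf' with
          | nil => simp only [pvStep]; rw [if_pos hs]; simp [pvHdr, pvBlockRows]
          | cons b buf'' =>
            simp only [pvStep]; rw [if_pos hs]
            simp only [pvHdr, pvBlockRows, List.cons_append,
              List.length_cons, List.foldl_append, List.foldl_cons, List.foldl_nil]
            have h2 : ¬ (buf''.length + 1 + 1 = 0) := by omega
            have h3 : buf''.length + 1 + 1 ≥ 2 := by omega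
            rw [if_neg h2, if_pos h3]
            by_cases hlen : (pvSplitRow ln).length = (pvSplitRow a).length
            · rw [if_pos hlen, if_neg (by simpa using hlen)]; simp
            · rw [if_neg hlen, if_pos (by simpa using hlen)]; simp
      rw [hA, hB]
      exact ih (fun l h => hL l (List.mem_cons_of_mem _ h)) ta (buf ++ [ln]) hgood
    · have hflush : (if pvBlockRows buf ≠ [] then ta ++ [pvBlockRows buf] else ta)
          = pvFinA (ta, buf) := by
        cases buf with
        | nil => rfl
        | cons l0 bufr =>
          simp only [pvFinA]
          rw [pmt_block _ (by simp) hg]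
          simp
      have hA : pvStepA (ta, buf) ln = (pvFinA (ta, buf), []) := by
        simp only [pvStepA]; rw [if_neg hs]
        cases buf with
        | nil => simp [pvFinA]
        | cons l0 bufr => simp [pvFinA]
      have hB : pvStep (ta, pvHdr buf, buf.length, pvBlockRows buf) ln
          = (pvFinA (ta, buf), [], 0, []) := by
        simp only [pvStep]; rw [if_neg hs]
        rw [← hflush]
        by_cases hrows : pvBlockRows buf = [] <;> simp [hrows]
      rw [hA, hB]
      have := ih (fun l h => hL l (List.mem_cons_of_mem _ h)) (pvFinA (ta, buf)) [] (by simp)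
      simpa [pvHdr, pvBlockRows] using this

theorem parse_all_tables_equiv (text : String) :
    parse_all_tables text = parse_all_tables_alt text := by
  have hA : parse_all_tables text
      = pvFinA ((PySem.Str.splitlines text).foldl pvStepA ([], [])) := rfl
  have hB : parse_all_tables_alt text
      = pvFinB ((PySem.Str.splitlines text).foldl pvStep ([], [], 0, [])) := rfl
  rw [hA, hB]
  have := main_loop (PySem.Str.splitlines text) (str_splitlines_bf text) [] [] (by simp)
  simpa [pvHdr, pvBlockRows] using this

-- ===== VERDICT (by name: the statement is the Claim_ definition above) =====
theorem parse_all_tables_spec : Claim_equal_parse_all_tables := by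
  intro text _
  unfold Spec_parse_all_tables
  exact parse_all_tables_equiv text
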